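-- pv_equiv track=rewrite | github.com/OlgaEfimova-7/tms-z28 | analytics.py | calculate_set_of_stock_price_delta_of_several_companies
-- ===== SOURCE A (Python) =====
-- def calculate_set_of_stock_price_delta_of_several_companies(list_of_delta):
--     zipped_list = zip(*list_of_delta)
--     final_list = []
--     for elem in zipped_list:
--         if None not in elem:
--             final_list.append(sum(elem))
--         else:
--             final_list.append(sum(filter(None.__ne__, elem)))
--     return final_list
-- ===== SOURCE B (Python) =====
-- def calculate_set_of_stock_price_delta_of_several_companies(list_of_delta):
--     if not list_of_delta:
--         return []
--     acc = [0] * min(len(row) for row in list_of_delta)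
--     for row in list_of_delta:
--         acc = [a + (0 if v is None else v) for a, v in zip(acc, row)]
--     return acc
-- ===== Notes on version B (the rewrite author's own statement) =====
-- stated objective: faster
-- what changed: Replaces the transpose-via-zip(*rows) plus per-column branching sum with a single row-major streaming pass that maintains one running sum per column (column count = shortest row length, 0 columns when there are no rows).
import Mathlib
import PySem

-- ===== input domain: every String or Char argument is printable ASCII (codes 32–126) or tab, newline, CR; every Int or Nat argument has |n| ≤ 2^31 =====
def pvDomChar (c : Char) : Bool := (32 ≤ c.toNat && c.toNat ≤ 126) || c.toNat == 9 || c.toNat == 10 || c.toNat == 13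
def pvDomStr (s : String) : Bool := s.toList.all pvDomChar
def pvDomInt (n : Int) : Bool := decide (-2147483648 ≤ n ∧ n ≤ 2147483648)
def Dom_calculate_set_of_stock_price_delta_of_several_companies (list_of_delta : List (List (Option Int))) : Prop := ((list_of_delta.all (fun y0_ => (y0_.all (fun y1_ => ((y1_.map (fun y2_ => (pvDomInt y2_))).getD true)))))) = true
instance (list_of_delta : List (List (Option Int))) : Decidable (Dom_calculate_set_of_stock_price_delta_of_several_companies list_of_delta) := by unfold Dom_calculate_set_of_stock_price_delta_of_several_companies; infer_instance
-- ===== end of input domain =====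

-- B streams row-major, keeping one running sum per column, instead of A's transpose via zip(*rows); return values proved equal on all inputs.

-- ===== PORT A =====
-- Python's zip(*rows): repeatedly take one element from every list, stopping as soon as any list is exhausted (also when rows = []).
def pyZipStar (rows : List (List (Option Int))) : List (List (Option Int)) :=
  if h : rows.isEmpty ∨ rows.any List.isEmpty then []
  else (rows.filterMap List.head?) :: pyZipStar (rows.map List.tail)
termination_by (rows.headD []).length
decreasing_by
  push_neg at h
  obtain ⟨h1, h2⟩ := h
  cases rows with
  | nil => simp at h1
  | cons r rs =>
    have hr : ¬ r.isEmpty := by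
      intro hre
      exact absurd (by simp [hre] : (r :: rs).any List.isEmpty = true) h2
    cases r with
    | nil => simp at hr
    | cons x xs => simp

def calculate_set_of_stock_price_delta_of_several_companies (list_of_delta : List (List (Option Int))) : List Int :=
  (pyZipStar list_of_delta).foldl
    (fun final_list elem =>
      if ¬ elem.contains none then
        -- sum(elem): all elements are ints here (no None in elem)
        final_list ++ [(elem.map (fun o => o.getD 0)).sum]
      else
        -- sum(filter(None.__ne__, elem))
        final_list ++ [((elem.filter (fun o => o ≠ none)).map (fun o => o.getD 0)).sum])
    []

-- ===== PORT B =====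
def calculate_set_of_stock_price_delta_of_several_companies_alt (list_of_delta : List (List (Option Int))) : List Int :=
  match list_of_delta with
  | [] => []
  | r :: rs =>
    -- min(len(row) for row in list_of_delta)
    let n := rs.foldl (fun m s => min m s.length) r.length
    (r :: rs).foldl
      (fun acc row => (acc.zip row).map (fun p => p.1 + (p.2.getD 0)))
      (List.replicate n (0 : Int))

-- ===== PRECONDITION & SPEC =====
def Spec_calculate_set_of_stock_price_delta_of_several_companies (list_of_delta : List (List (Option Int))) (out : List Int) : Prop := out = calculate_set_of_stock_price_delta_of_several_companies_alt list_of_delta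
instance (list_of_delta : List (List (Option Int))) (out : List Int) : Decidable (Spec_calculate_set_of_stock_price_delta_of_several_companies list_of_delta out) := by unfold Spec_calculate_set_of_stock_price_delta_of_several_companies; infer_instance

-- ===== CLAIM (what is proved, stated in full; the proofs are below) =====
def Claim_equal_calculate_set_of_stock_price_delta_of_several_companies : Prop := ∀ (list_of_delta : List (List (Option Int))), Dom_calculate_set_of_stock_price_delta_of_several_companies list_of_delta → Spec_calculate_set_of_stock_price_delta_of_several_companies list_of_delta (calculate_set_of_stock_price_delta_of_several_companies list_of_delta)

-- ===== LEMMAS AND PROOFS =====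

-- the common specification: column j's sum, skipping none
def pvColSum (rows : List (List (Option Int))) (j : Nat) : Int :=
  (rows.map (fun r => (r.getD j none).getD 0)).sum

-- the common column count: minimum row length (0 for no rows)
def pvMn (rows : List (List (Option Int))) : Nat :=
  match rows with
  | [] => 0
  | r :: rs => rs.foldl (fun m s => min m s.length) r.length

theorem pvFoldlMin_le_init (rs : List (List (Option Int))) (a : Nat) :
    rs.foldl (fun m s => min m s.length) a ≤ a := by
  induction rs generalizing a with
  | nil => simp
  | cons s rs ih => exact le_trans (ih (min a s.length)) (by omega)

theorem pvFoldlMin_le_mem (rs : List (List (Option Int))) (a : Nat) (s : List (Option Int))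
    (hs : s ∈ rs) : rs.foldl (fun m s => min m s.length) a ≤ s.length := by
  induction rs generalizing a with
  | nil => simp at hs
  | cons t rs ih =>
    rcases List.mem_cons.mp hs with h | h
    · subst h
      exact le_trans (pvFoldlMin_le_init rs _) (by simp)
    · exact ih _ h

theorem pvMn_le (rows : List (List (Option Int))) (s : List (Option Int)) (hs : s ∈ rows) :
    pvMn rows ≤ s.length := by
  cases rows with
  | nil => simp at hs
  | cons r rs =>
    rcases List.mem_cons.mp hs with h | h
    · subst h; exact pvFoldlMin_le_init rs _
    · exact pvFoldlMin_le_mem rs _ _ h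

theorem pvFoldlMin_lb (rs : List (List (Option Int))) (a k : Nat) (ha : k ≤ a)
    (h : ∀ s ∈ rs, k ≤ s.length) : k ≤ rs.foldl (fun m s => min m s.length) a := by
  induction rs generalizing a with
  | nil => simpa
  | cons s rs ih =>
    exact ih (min a s.length) (le_min ha (h s (by simp)))
      (fun t ht => h t (by simp [ht]))

theorem pvMn_pos (rows : List (List (Option Int))) (hne : rows ≠ [])
    (h : ∀ s ∈ rows, s ≠ []) : 1 ≤ pvMn rows := by
  cases rows with
  | nil => exact absurd rfl hne
  | cons r rs =>
    refine pvFoldlMin_lb rs r.length 1 ?_ ?_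
    · have := h r (by simp)
      cases r <;> simp_all
    · intro s hs
      have := h s (by simp [hs])
      cases s <;> simp_all

theorem pvFoldlMin_tail (rs : List (List (Option Int))) (a : Nat) (ha : 1 ≤ a)
    (h : ∀ s ∈ rs, s ≠ []) :
    (rs.map List.tail).foldl (fun m s => min m s.length) (a - 1)
      = rs.foldl (fun m s => min m s.length) a - 1 := by
  induction rs generalizing a with
  | nil => simp
  | cons s rs ih =>
    have hs : s ≠ [] := h s (by simp)
    have hslen : 1 ≤ s.length := by cases s <;> simp_all
    simp only [List.map_cons, List.foldl_cons]
    have htail : s.tail.length = s.length - 1 := by simp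
    rw [htail]
    have : min (a - 1) (s.length - 1) = min a s.length - 1 := by omega
    rw [this]
    exact ih (min a s.length) (by omega) (fun t ht => h t (by simp [ht]))

theorem pvMn_tail (rows : List (List (Option Int))) (hne : rows ≠ [])
    (h : ∀ s ∈ rows, s ≠ []) :
    pvMn (rows.map List.tail) = pvMn rows - 1 := by
  cases rows with
  | nil => exact absurd rfl hne
  | cons r rs =>
    have hr : r ≠ [] := h r (by simp)
    have hrlen : 1 ≤ r.length := by cases r <;> simp_all
    simp only [pvMn, List.map_cons]
    have : r.tail.length = r.length - 1 := by simp
    rw [this]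
    exact pvFoldlMin_tail rs r.length hrlen (fun t ht => h t (by simp [ht]))

theorem pvGetD_tail (r : List (Option Int)) (j : Nat) :
    r.tail.getD j none = r.getD (j + 1) none := by
  cases r <;> simp [List.getD]

theorem pvFilterMapHead (rows : List (List (Option Int))) (h : ∀ s ∈ rows, s ≠ []) :
    rows.filterMap List.head? = rows.map (fun r => r.getD 0 none) := by
  induction rows with
  | nil => simp
  | cons r rs ih =>
    have hr : r ≠ [] := h r (by simp)
    cases r with
    | nil => exact absurd rfl hr
    | cons x xs =>
      simp [List.getD, ih (fun t ht => h t (by simp [ht]))]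

theorem pvZipStar_eq (n : Nat) (rows : List (List (Option Int))) (hn : pvMn rows = n) :
    pyZipStar rows = (List.range n).map (fun j => rows.map (fun r => r.getD j none)) := by
  induction n generalizing rows with
  | zero =>
    rw [pyZipStar]
    simp only [List.range_zero, List.map_nil]
    split
    · rfl
    · rename_i h
      push_neg at h
      obtain ⟨h1, h2⟩ := h
      exfalso
      have hne : rows ≠ [] := by
        intro he; subst he; simp at h1
      have hall : ∀ s ∈ rows, s ≠ [] := by
        intro s hs he
        exact absurd (List.any_eq_true.mpr ⟨s, hs, by simp [he]⟩) h2
      have := pvMn_pos rows hne hall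
      omega
  | succ m ih =>
    have hne : rows ≠ [] := by
      intro he; subst he; simp [pvMn] at hn
    have hall : ∀ s ∈ rows, s ≠ [] := by
      intro s hs he
      have := pvMn_le rows s hs
      subst he; simp at this; omega
    rw [pyZipStar]
    have hguard : ¬ (rows.isEmpty ∨ rows.any List.isEmpty) := by
      rintro (hg | hg)
      · exact hne (List.isEmpty_iff.mp hg)
      · obtain ⟨s, hs, hse⟩ := List.any_eq_true.mp hg
        exact hall s hs (List.isEmpty_iff.mp hse)
    rw [dif_neg hguard]
    have hmt : pvMn (rows.map List.tail) = m := by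
      rw [pvMn_tail rows hne hall, hn]
      omega
    rw [ih _ hmt, pvFilterMapHead rows hall, List.range_succ_eq_map]
    simp only [List.map_cons, List.map_map]
    congr 1
    apply List.map_congr_left
    intro j _
    simp only [Function.comp_apply]
    apply List.map_congr_left
    intro r _
    simp only [Function.comp_apply]
    exact pvGetD_tail r j

theorem pvFilterSum (elem : List (Option Int)) :
    ((elem.filter (fun o => o ≠ none)).map (fun o => o.getD 0)).sum
      = (elem.map (fun o => o.getD 0)).sum := by
  induction elem with
  | nil => simp
  | cons o rest ih =>
    cases o with
    | none =>
      simp only [List.filter_cons, List.map_cons, decide_eq_true_eq] at *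
      simpa using ih
    | some v =>
      simp only [List.filter_cons, List.map_cons, decide_eq_true_eq] at *
      simpa using ih

theorem pvFoldlAppend (l : List (List (Option Int))) (f : List (Option Int) → Int)
    (init : List Int) :
    l.foldl (fun acc e => acc ++ [f e]) init = init ++ l.map f := by
  induction l generalizing init with
  | nil => simp
  | cons e rest ih => simp [ih]

theorem pvA_eq_spec (rows : List (List (Option Int))) :
    calculate_set_of_stock_price_delta_of_several_companies rows
      = (List.range (pvMn rows)).map (pvColSum rows) := by
  unfold calculate_set_of_stock_price_delta_of_several_companies
  rw [pvZipStar_eq (pvMn rows) rows rfl]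
  have hbody : ∀ (acc : List Int) (elem : List (Option Int)),
      (if ¬ elem.contains none then
        acc ++ [(elem.map (fun o => o.getD 0)).sum]
      else
        acc ++ [((elem.filter (fun o => o ≠ none)).map (fun o => o.getD 0)).sum])
      = acc ++ [(elem.map (fun o => o.getD 0)).sum] := by
    intro acc elem
    split
    · rfl
    · rw [pvFilterSum]
  have hfun : (fun (final_list : List Int) (elem : List (Option Int)) =>
      if ¬ elem.contains none then
        final_list ++ [(elem.map (fun o => o.getD 0)).sum]
      else
        final_list ++ [((elem.filter (fun o => o ≠ none)).map (fun o => o.getD 0)).sum])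
      = (fun final_list elem => final_list ++ [(elem.map (fun o => o.getD 0)).sum]) := by
    funext acc elem
    exact hbody acc elem
  rw [hfun, pvFoldlAppend]
  simp only [List.nil_append, List.map_map]
  apply List.map_congr_left
  intro j _
  simp [pvColSum, List.getD_eq_getElem?_getD, Function.comp_def]

-- B-side: the identity map over range of getD
theorem pvRangeGetD (l : List Int) :
    (List.range l.length).map (fun j => l.getD j 0) = l := by
  induction l with
  | nil => simp
  | cons x xs ih =>
    rw [List.length_cons, List.range_succ_eq_map, List.map_cons, List.map_map]
    have h2 : (List.range xs.length).map ((fun j => (x :: xs).getD j 0) ∘ Nat.succ)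
        = (List.range xs.length).map (fun j => xs.getD j 0) := by
      apply List.map_congr_left
      intro j _
      simp [Function.comp, List.getD]
    rw [h2, ih]
    simp [List.getD]

theorem pvColSum_cons (row : List (Option Int)) (rest : List (List (Option Int))) (j : Nat) :
    pvColSum (row :: rest) j = (row.getD j none).getD 0 + pvColSum rest j := by
  simp [pvColSum]

theorem pvZipMapGetD (acc : List Int) (row : List (Option Int)) (j : Nat)
    (hj : j < acc.length) (hlen : acc.length ≤ row.length) :
    ((acc.zip row).map (fun p => p.1 + (p.2.getD 0))).getD j 0
      = acc.getD j 0 + (row.getD j none).getD 0 := by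
  have hjz : j < (acc.zip row).length := by simp; omega
  have hjr : j < row.length := by omega
  rw [List.getD_eq_getElem?_getD, List.getElem?_eq_getElem (by simpa using hjz)]
  simp only [List.getElem_map, List.getElem_zip, Option.getD_some]
  rw [List.getD_eq_getElem?_getD, List.getElem?_eq_getElem hj,
      List.getD_eq_getElem?_getD, List.getElem?_eq_getElem hjr]
  rfl

theorem pvB_inv (rows : List (List (Option Int))) (acc : List Int)
    (h : ∀ row ∈ rows, acc.length ≤ row.length) :
    rows.foldl (fun acc row => (acc.zip row).map (fun p => p.1 + (p.2.getD 0))) acc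
      = (List.range acc.length).map (fun j => acc.getD j 0 + pvColSum rows j) := by
  induction rows generalizing acc with
  | nil =>
    simp only [List.foldl_nil]
    have : (List.range acc.length).map (fun j => acc.getD j 0 + pvColSum [] j)
        = (List.range acc.length).map (fun j => acc.getD j 0) := by
      apply List.map_congr_left; intro j _; simp [pvColSum]
    rw [this, pvRangeGetD]
  | cons row rest ih =>
    simp only [List.foldl_cons]
    have hlen : acc.length ≤ row.length := h row (by simp)
    have hacc' : ((acc.zip row).map (fun p => p.1 + (p.2.getD 0))).length = acc.length := by
      simp; omega
    rw [ih _ (fun t ht => by rw [hacc']; exact h t (by simp [ht]))]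
    rw [hacc']
    apply List.map_congr_left
    intro j hj
    rw [pvZipMapGetD acc row j (List.mem_range.mp hj) hlen, pvColSum_cons]
    ring

theorem pvB_eq_spec (rows : List (List (Option Int))) :
    calculate_set_of_stock_price_delta_of_several_companies_alt rows
      = (List.range (pvMn rows)).map (pvColSum rows) := by
  cases rows with
  | nil => simp [calculate_set_of_stock_price_delta_of_several_companies_alt, pvMn]
  | cons r rs =>
    show (r :: rs).foldl
        (fun acc row => (acc.zip row).map (fun p => p.1 + (p.2.getD 0)))
        (List.replicate (pvMn (r :: rs)) (0 : Int))
      = (List.range (pvMn (r :: rs))).map (pvColSum (r :: rs))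
    rw [pvB_inv (r :: rs) (List.replicate (pvMn (r :: rs)) (0 : Int))
      (fun row hrow => by simpa using pvMn_le (r :: rs) row hrow)]
    simp only [List.length_replicate]
    apply List.map_congr_left
    intro j _
    simp

-- ===== VERDICT (by name: the statement is the Claim_ definition above) =====
theorem calculate_set_of_stock_price_delta_of_several_companies_spec : Claim_equal_calculate_set_of_stock_price_delta_of_several_companies := by
  intro rows _
  unfold Spec_calculate_set_of_stock_price_delta_of_several_companies
  rw [pvA_eq_spec, pvB_eq_spec]
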